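-- pv_equiv track=rewrite | github.com/mmosh-pit/kinship | kinship-knowledge/app/graphs/scene_conversation.py | _format_basic_catalog
-- ===== SOURCE A (Python) =====
-- def _format_basic_catalog(assets: list[dict]) -> str:
--     """Fallback: just names + types."""
--     by_type: dict[str, list[str]] = {}
--     for a in assets:
--         by_type.setdefault(a.get("type", "object"), []).append(
--             f"{a.get('name', '?')} ({a.get('display_name', '?')})"
--         )
--     lines = ["<available_assets>"]
--     for atype, names in by_type.items():
--         lines.append(f"\n[{atype.upper()}]")
--         for n in names:
--             lines.append(f"  {n}")
--     lines.append("</available_assets>")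
--     return "\n".join(lines)
-- ===== SOURCE B (Python) =====
-- def _format_basic_catalog(assets: list[dict]) -> str:
--     """Fallback: just names + types."""
--     types = list(dict.fromkeys(a.get("type", "object") for a in assets))
--     out = ["<available_assets>"]
--     for t in types:
--         out.append(f"\n[{t.upper()}]")
--         out.extend(
--             f"  {a.get('name', '?')} ({a.get('display_name', '?')})"
--             for a in assets
--             if a.get("type", "object") == t
--         )
--     out.append("</available_assets>")
--     return "\n".join(out)
-- ===== Notes on version B (the rewrite author's own statement) =====
-- stated objective: alternative
-- what changed: B replaces A's single-pass grouping dict with a two-phase scheme: first dedup the asset types in first-appearance order, then re-scan the asset list once per type to emit its lines.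
import Mathlib
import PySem

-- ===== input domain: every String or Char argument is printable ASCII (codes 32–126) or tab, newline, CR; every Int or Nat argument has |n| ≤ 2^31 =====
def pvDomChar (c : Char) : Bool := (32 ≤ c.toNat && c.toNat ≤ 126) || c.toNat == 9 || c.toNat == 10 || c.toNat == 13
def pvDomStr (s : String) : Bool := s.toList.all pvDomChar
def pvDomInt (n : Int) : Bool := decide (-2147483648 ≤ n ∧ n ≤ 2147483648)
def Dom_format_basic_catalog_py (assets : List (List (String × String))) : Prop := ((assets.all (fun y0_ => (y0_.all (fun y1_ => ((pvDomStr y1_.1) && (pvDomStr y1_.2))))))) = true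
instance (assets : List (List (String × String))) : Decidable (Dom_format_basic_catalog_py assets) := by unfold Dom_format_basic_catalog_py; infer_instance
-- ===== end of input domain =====

-- B is an alternative decomposition: dedup the types first, then one re-scan of the assets per type;
-- equally exact, no speed claim.

-- a.get(k, dflt) on an asset dict (the inner association lists are Python dicts)
def pvAGet (a : List (String × String)) (k dflt : String) : String :=
  (PySem.Dict.ofList a).getD k dflt

-- f"{a.get('name','?')} ({a.get('display_name','?')})"
def pvALine (a : List (String × String)) : String :=
  pvAGet a "name" "?" ++ " (" ++ pvAGet a "display_name" "?" ++ ")"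

-- ===== PORT A =====
def format_basic_catalog_py (assets : List (List (String × String))) : String :=
  let by_type : PySem.Dict String (List String) :=
    assets.foldl
      (fun d a => d.modify (pvAGet a "type" "object") [] (fun old => old ++ [pvALine a]))
      PySem.Dict.empty
  let lines : List String :=
    by_type.items.foldl
      (fun ls p =>
        p.2.foldl (fun ls n => ls ++ ["  " ++ n])
          (ls ++ ["\n[" ++ PySem.Str.upper p.1 ++ "]"]))
      ["<available_assets>"]
  PySem.Str.join "\n" (lines ++ ["</available_assets>"])

-- ===== PORT B =====
def format_basic_catalog_py_alt (assets : List (List (String × String))) : String :=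
  let types : List String :=
    PySem.List.dedup (assets.map (fun a => pvAGet a "type" "object"))
  let out : List String :=
    types.foldl
      (fun ls t =>
        (ls ++ ["\n[" ++ PySem.Str.upper t ++ "]"]) ++
          ((assets.filter (fun a => pvAGet a "type" "object" == t)).map
            (fun a => "  " ++ pvALine a)))
      ["<available_assets>"]
  PySem.Str.join "\n" (out ++ ["</available_assets>"])

-- ===== PRECONDITION & SPEC =====
def Spec_format_basic_catalog_py (assets : List (List (String × String))) (out : String) : Prop := out = format_basic_catalog_py_alt assets
instance (assets : List (List (String × String))) (out : String) : Decidable (Spec_format_basic_catalog_py assets out) := by unfold Spec_format_basic_catalog_py; infer_instance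

-- ===== CLAIM (what is proved, stated in full; the proofs are below) =====
def Claim_equal_format_basic_catalog_py : Prop := ∀ (assets : List (List (String × String))), Dom_format_basic_catalog_py assets → Spec_format_basic_catalog_py assets (format_basic_catalog_py assets)

-- ===== LEMMAS AND PROOFS =====

-- the inner append-one-line loop of A is an append of a map
theorem pv_foldl_app {α : Type} (f : α → String) (l : List α) (init : List String) :
    l.foldl (fun ls n => ls ++ [f n]) init = init ++ l.map f := by
  induction l generalizing init with
  | nil => simp
  | cons x xs ih => simp [List.foldl_cons, ih, List.append_assoc]

-- foldl over the same list with pointwise-equal step functions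
theorem pv_foldl_ext {α β : Type} (f g : β → α → β) (l : List α) (i : β)
    (h : ∀ acc x, f acc x = g acc x) : l.foldl f i = l.foldl g i := by
  induction l generalizing i with
  | nil => rfl
  | cons x xs ih => simp only [List.foldl_cons, h, ih]

theorem pv_items_grouped (assets : List (List (String × String))) :
    (assets.foldl
        (fun d a => d.modify (pvAGet a "type" "object") [] (fun old => old ++ [pvALine a]))
        PySem.Dict.empty).items
      = (PySem.List.dedup (assets.map (fun a => pvAGet a "type" "object"))).map
          (fun t => (t, (assets.filter (fun a => pvAGet a "type" "object" == t)).map pvALine)) := by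
  have hfold :
      assets.foldl
        (fun d a => d.modify (pvAGet a "type" "object") [] (fun old => old ++ [pvALine a]))
        PySem.Dict.empty
      = assets.foldl
        (fun d a => d.modify ((fun a => pvAGet a "type" "object") a) []
          ((fun (_ : PySem.Dict String (List String)) (a : List (String × String)) (old : List String) =>
            old ++ [pvALine a]) d a)) PySem.Dict.empty := rfl
  have hnodup : (assets.foldl
      (fun d a => d.modify (pvAGet a "type" "object") [] (fun old => old ++ [pvALine a]))
      PySem.Dict.empty).keys.Nodup := by
    rw [hfold]
    exact PySem.Dict.nodup_keys_foldl_modify_key assets _ _ _ _ (by simp [PySem.Dict.keys, PySem.Dict.empty])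
  have hkeys : (assets.foldl
      (fun d a => d.modify (pvAGet a "type" "object") [] (fun old => old ++ [pvALine a]))
      PySem.Dict.empty).keys
      = PySem.List.dedup (assets.map (fun a => pvAGet a "type" "object")) := by
    rw [hfold, PySem.Dict.keys_foldl_modify_key assets (fun a => pvAGet a "type" "object")]
    simp [PySem.Dict.empty, PySem.Set.update_nil_left, PySem.List.dedup_eq_ofList, PySem.Dict.keys]
  have hgetD : ∀ c, (assets.foldl
      (fun d a => d.modify (pvAGet a "type" "object") [] (fun old => old ++ [pvALine a]))
      PySem.Dict.empty).getD c []
      = (assets.filter (fun a => pvAGet a "type" "object" == c)).map pvALine := by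
    intro c
    have hm : assets.foldl
        (fun d a => d.modify (pvAGet a "type" "object") [] (fun old => old ++ [pvALine a]))
        PySem.Dict.empty
        = (assets.map (fun a => (pvAGet a "type" "object", pvALine a))).foldl
          (fun d p => d.modify p.1 [] (fun x => x ++ [p.2])) PySem.Dict.empty := by
      rw [List.foldl_map]
    rw [hm, PySem.Dict.getD_foldl_modify_append]
    simp [List.filter_map, Function.comp_def]
  rw [PySem.Dict.items_eq_map_keys _ hnodup ([] : List String), hkeys]
  apply List.map_congr_left
  intro t _
  rw [hgetD]

theorem format_basic_catalog_py_eq (assets : List (List (String × String))) :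
    format_basic_catalog_py assets = format_basic_catalog_py_alt assets := by
  simp only [format_basic_catalog_py, format_basic_catalog_py_alt]
  congr 2
  rw [pv_items_grouped, List.foldl_map]
  apply pv_foldl_ext
  intro ls t
  rw [pv_foldl_app]
  simp [List.map_map, Function.comp_def, List.append_assoc]

-- ===== VERDICT (by name: the statement is the Claim_ definition above) =====
theorem format_basic_catalog_py_spec : Claim_equal_format_basic_catalog_py := by
  intro assets _
  unfold Spec_format_basic_catalog_py
  exact format_basic_catalog_py_eq assets
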